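-- pv_equiv track=rewrite | github.com/kiwoook/codingtest | 프로그래머스/문자열_나누기.py | solution
-- ===== SOURCE A (Python) =====
-- def solution(s):
--     answer = 0
--     list_s = list(s)
--     len_s = len(list_s)
--     compare_idx = 0
--     while compare_idx < len_s:
--         same_cnt = 0
--         diff_cnt = 0
--         for i in range(compare_idx, len_s):
--             if list_s[compare_idx] == list_s[i]:
--                 same_cnt += 1
--             else:
--                 diff_cnt += 1
--             if same_cnt == diff_cnt or i == len_s - 1:
--                 compare_idx = i + 1
--                 answer += 1
--                 break
--
--     return answer
-- ===== SOURCE B (Python) =====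
-- def solution(s):
--     answer = 0
--     stack = []
--     for ch in s:
--         if not stack:
--             answer += 1
--             stack.append(ch)
--         elif ch == stack[-1]:
--             stack.append(ch)
--         else:
--             stack.pop()
--     return answer
-- ===== Notes on version B (the rewrite author's own statement) =====
-- stated objective: alternative
-- what changed: Replaced A's nested index scans with same/diff counters by a stack-cancellation pass (push on match with the segment head, pop on mismatch; a segment is counted when it opens on an empty stack), which removes the counters and the explicit leftover-segment handling.
import Mathlib
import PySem

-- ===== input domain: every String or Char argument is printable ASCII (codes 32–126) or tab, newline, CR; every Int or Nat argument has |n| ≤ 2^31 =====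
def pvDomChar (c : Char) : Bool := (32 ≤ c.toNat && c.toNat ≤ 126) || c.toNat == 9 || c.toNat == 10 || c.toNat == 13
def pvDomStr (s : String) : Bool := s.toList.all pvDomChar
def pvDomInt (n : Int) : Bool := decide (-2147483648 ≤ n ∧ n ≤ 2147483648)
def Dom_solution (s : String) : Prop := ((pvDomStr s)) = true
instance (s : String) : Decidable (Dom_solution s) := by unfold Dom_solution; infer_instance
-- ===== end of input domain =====

-- B replaces A's nested index scans with same/diff counters by a stack-cancellation pass
-- counting a segment when it opens; objective: alternative (same O(n) cost, different data structure).


-- ===== PORT A =====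
-- inner 'for i in range(compare_idx, len_s)' loop with its break; fuel = number of
-- remaining indices; returns 'some (i+1)' (the new compare_idx) on break, 'none' if the
-- range is exhausted without break (unreachable when called with i < n).
-- list accesses use getD; the indices are always in range, where getD equals Python's list_s[i].
def innerA (l : List Char) (n : Nat) (c : Nat) : Nat → Nat → Int → Int → Option Nat
  | 0, _, _, _ => none
  | fuel + 1, i, same_cnt, diff_cnt =>
    if i < n then
      let same' := if l.getD c ' ' = l.getD i ' ' then same_cnt + 1 else same_cnt
      let diff' := if l.getD c ' ' = l.getD i ' ' then diff_cnt else diff_cnt + 1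
      if same' = diff' ∨ i = n - 1 then some (i + 1)
      else innerA l n c fuel (i + 1) same' diff'
    else none

-- outer 'while compare_idx < len_s' loop; compare_idx strictly increases each pass, so
-- fuel n+1 suffices; 'none' from innerA is Python's (unreachable) infinite loop.
def outerA (l : List Char) (n : Nat) : Nat → Nat → Int → Int
  | 0, _, answer => answer
  | fuel + 1, compare_idx, answer =>
    if compare_idx < n then
      match innerA l n compare_idx (n - compare_idx) compare_idx 0 0 with
      | some c' => outerA l n fuel c' (answer + 1)
      | none => answer
    else answer

def solution (s : String) : Int :=
  let l := s.toList
  outerA l l.length (l.length + 1) 0 0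

-- ===== PORT B =====
-- stack-cancellation pass: on an empty stack a new segment opens (answer += 1, push the
-- head); on a match with the top (= the segment head) push, on a mismatch pop; the
-- segment is closed exactly when the stack empties.
def loopB : List Char → List Char → Int → Int
  | [], _, answer => answer
  | ch :: rest, [], answer => loopB rest [ch] (answer + 1)
  | ch :: rest, top :: stk, answer =>
    if ch = top then loopB rest (ch :: top :: stk) answer
    else loopB rest stk answer

def solution_alt (s : String) : Int := loopB s.toList [] 0

-- ===== PRECONDITION & SPEC =====
def Spec_solution (s : String) (out : Int) : Prop := out = solution_alt s
instance (s : String) (out : Int) : Decidable (Spec_solution s out) := by unfold Spec_solution; infer_instance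

-- ===== CLAIM (what is proved, stated in full; the proofs are below) =====
def Claim_equal_solution : Prop := ∀ (s : String), Dom_solution s → Spec_solution s (solution s)

-- ===== LEMMAS AND PROOFS =====

-- mid-segment invariant: A's counters (same, diff) with same - diff = k ≥ 1 correspond to
-- B's stack = k copies of the segment head; A's break lands where B's stack empties.
lemma inner_eq (l : List Char) (c : Nat) :
    ∀ fuel i same diff (k : Nat) ans, i < l.length → l.length - i ≤ fuel →
    same - diff = (k : Int) → 1 ≤ k →
    ∃ c', innerA l l.length c fuel i same diff = some c' ∧ i < c' ∧ c' ≤ l.length ∧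
      loopB (l.drop i) (List.replicate k (l.getD c ' ')) ans = loopB (l.drop c') [] ans := by
  intro fuel
  induction fuel with
  | zero => intro i same diff k ans hi hf _ _; omega
  | succ fuel ih =>
    intro i same diff k ans hi hf hk hk1
    have hdrop : l.drop i = l[i] :: l.drop (i + 1) := List.drop_eq_getElem_cons hi
    have hgd : l.getD i ' ' = l[i] := List.getD_eq_getElem l ' ' hi
    obtain ⟨k', rfl⟩ : ∃ k', k = k' + 1 := ⟨k - 1, by omega⟩
    by_cases hceq : l.getD c ' ' = l.getD i ' '
    · -- match: push
      have hli : l[i] = l.getD c ' ' := by rw [← hgd, hceq]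
      have hB : loopB (l.drop i) (List.replicate (k' + 1) (l.getD c ' ')) ans =
          loopB (l.drop (i + 1)) (List.replicate (k' + 2) (l.getD c ' ')) ans := by
        rw [hdrop, List.replicate_succ]
        simp only [loopB]
        rw [if_pos hli, hli]
        rfl
      by_cases hlast : i = l.length - 1
      · refine ⟨i + 1, ?_, by omega, by omega, ?_⟩
        · simp only [innerA, if_pos hi]
          rw [if_pos hceq, if_pos hceq, if_pos (Or.inr hlast)]
        · have hnil : l.drop (i + 1) = [] := by
            have : i + 1 = l.length := by omega
            rw [this, List.drop_length]
          rw [hB, hnil]; simp [loopB]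
      · obtain ⟨c', h1, h2, h3, h4⟩ :=
          ih (i + 1) (same + 1) diff (k' + 2) ans (by omega) (by omega) (by push_cast at hk ⊢; omega) (by omega)
        refine ⟨c', ?_, by omega, h3, ?_⟩
        · simp only [innerA, if_pos hi]
          rw [if_pos hceq, if_pos hceq, if_neg (by push_cast at hk ⊢; omega)]
          exact h1
        · rw [hB]; exact h4
    · -- mismatch: pop
      have hli : ¬ (l[i] = l.getD c ' ') := by rw [← hgd]; exact fun h => hceq h.symm
      have hB : loopB (l.drop i) (List.replicate (k' + 1) (l.getD c ' ')) ans =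
          loopB (l.drop (i + 1)) (List.replicate k' (l.getD c ' ')) ans := by
        rw [hdrop, List.replicate_succ]
        simp only [loopB]
        rw [if_neg hli]
      by_cases hk0 : k' = 0
      · -- stack empties: A's break (same' = diff')
        subst hk0
        have hsd : same = diff + 1 := by push_cast at hk; omega
        refine ⟨i + 1, ?_, by omega, by omega, ?_⟩
        · simp only [innerA, if_pos hi]
          rw [if_neg hceq, if_neg hceq, if_pos (Or.inl hsd)]
        · rw [hB]; simp
      · by_cases hlast : i = l.length - 1
        · refine ⟨i + 1, ?_, by omega, by omega, ?_⟩
          · simp only [innerA, if_pos hi]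
            rw [if_neg hceq, if_neg hceq, if_pos (Or.inr hlast)]
          · have hnil : l.drop (i + 1) = [] := by
              have : i + 1 = l.length := by omega
              rw [this, List.drop_length]
            rw [hB, hnil]; simp [loopB]
        · obtain ⟨c', h1, h2, h3, h4⟩ :=
            ih (i + 1) same (diff + 1) k' ans (by omega) (by omega) (by push_cast at hk ⊢; omega) (by omega)
          refine ⟨c', ?_, by omega, h3, ?_⟩
          · simp only [innerA, if_pos hi]
            rw [if_neg hceq, if_neg hceq, if_neg (by push_cast at hk ⊢; omega)]
            exact h1
          · rw [hB]; exact h4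

lemma outer_eq (l : List Char) :
    ∀ fuel c ans, c ≤ l.length → l.length - c + 1 ≤ fuel →
    outerA l l.length fuel c ans = loopB (l.drop c) [] ans := by
  intro fuel
  induction fuel with
  | zero => intro c ans hc hf; omega
  | succ fuel ih =>
    intro c ans hc hf
    by_cases hlt : c < l.length
    · have hdrop : l.drop c = l[c] :: l.drop (c + 1) := List.drop_eq_getElem_cons hlt
      have hgd : l.getD c ' ' = l[c] := List.getD_eq_getElem l ' ' hlt
      -- B opens the segment: answer + 1, stack = [head]
      have hopen : loopB (l.drop c) [] ans =
          loopB (l.drop (c + 1)) (List.replicate 1 (l.getD c ' ')) (ans + 1) := by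
        rw [hdrop, hgd]; simp [loopB, List.replicate]
      -- A's first inner step: same' = 1, diff' = 0
      by_cases hlast : c = l.length - 1
      · have h1 : innerA l l.length c (l.length - c) c 0 0 = some (c + 1) := by
          have hfc : l.length - c = 1 := by omega
          rw [hfc]
          simp only [innerA, if_pos hlt, if_true]
          rw [if_pos (Or.inr hlast)]
        have hc1 : c + 1 = l.length := by omega
        have hnil : l.drop (c + 1) = [] := by rw [hc1, List.drop_length]
        simp only [outerA, if_pos hlt, h1]
        rw [ih (c + 1) (ans + 1) (by omega) (by omega), hnil, hopen, hnil]
        simp [loopB]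
      · obtain ⟨f, hf'⟩ : ∃ f, l.length - c = f + 1 := ⟨l.length - c - 1, by omega⟩
        obtain ⟨c', h1, h2, h3, h4⟩ :=
          inner_eq l c f (c + 1) 1 0 1 (ans + 1) (by omega) (by omega) (by norm_num) le_rfl
        have hstep : innerA l l.length c (l.length - c) c 0 0 = some c' := by
          rw [hf']
          simp only [innerA, if_pos hlt, if_true]
          rw [if_neg (not_or.mpr ⟨by norm_num, hlast⟩)]
          exact h1
        simp only [outerA, if_pos hlt, hstep]
        rw [ih c' (ans + 1) h3 (by omega), hopen, h4]
    · have hce : c = l.length := by omega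
      have hnil : l.drop c = [] := by rw [hce, List.drop_length]
      simp [outerA, hlt, hnil, loopB]

-- ===== VERDICT (by name: the statement is the Claim_ definition above) =====
theorem solution_spec : Claim_equal_solution := by
  intro s _
  show solution s = solution_alt s
  unfold solution solution_alt
  exact outer_eq s.toList (s.toList.length + 1) 0 0 (Nat.zero_le _) (by omega)
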